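-- pv_equiv track=rewrite | github.com/Carriger/webScraper | webscraping.py | biGramHelper
-- ===== SOURCE A (Python) =====
-- def biGramHelper(tokenDict):
--     biGramsDict = {}
--     for term in tokenDict.keys():
--         dollarTerm = "$"+term+"$"
--         index = 0
--         while index < len(term)+1:
--             #stepping through our terms 2 chars at a time
--             biGrams = dollarTerm[index]+(dollarTerm[index + 1])
--             if biGrams not in biGramsDict:
--                 biGramsDict[biGrams] = [term]
--             else:
--                 temp = biGramsDict[biGrams]
--                 temp = temp + [term]
--                 #alphabetizing our terms
--                 temp = sorted(temp)
--                 biGramsDict[biGrams] = temp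
--             index += 1
--
--     return biGramsDict
-- ===== SOURCE B (Python) =====
-- def biGramHelper(tokenDict):
--     # Different decomposition: one pass flattens every (bigram, term) occurrence
--     # into a single pair list; then distinct bigrams are taken in first-occurrence
--     # order, and each bigram's terms are gathered from the flat list and sorted once.
--     occs = [(a + b, t)
--             for t in tokenDict
--             for p in ["$" + t + "$"]
--             for a, b in zip(p, p[1:])]
--     keys = list(dict.fromkeys(bg for bg, _ in occs))
--     return {bg: sorted(t for b, t in occs if b == bg) for bg in keys}
-- ===== Notes on version B (the rewrite author's own statement) =====
-- stated objective: faster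
-- what changed: A incrementally maintains a dict of buckets while scanning each term by index, re-sorting a bigram's whole bucket on every single insertion; B never maintains buckets: it flattens all (bigram, term) occurrences into one flat pair list in one pass, dedups the bigrams for key order, then gathers each bigram's terms from the flat list and sorts them once per bigram.
import Mathlib
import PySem

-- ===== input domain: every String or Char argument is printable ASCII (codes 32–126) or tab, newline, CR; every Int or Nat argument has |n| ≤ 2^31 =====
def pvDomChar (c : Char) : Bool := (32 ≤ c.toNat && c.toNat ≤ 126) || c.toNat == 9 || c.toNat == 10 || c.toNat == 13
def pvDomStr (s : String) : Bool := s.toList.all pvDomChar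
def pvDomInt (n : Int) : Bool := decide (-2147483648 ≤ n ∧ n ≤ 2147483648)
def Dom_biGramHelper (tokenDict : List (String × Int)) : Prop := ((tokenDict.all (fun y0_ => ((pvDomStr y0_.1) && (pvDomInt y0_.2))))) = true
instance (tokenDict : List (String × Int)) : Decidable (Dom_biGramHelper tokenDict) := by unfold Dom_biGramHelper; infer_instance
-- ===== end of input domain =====

-- B abandons A's incrementally-maintained bucket dict (re-sorted on every insertion): it flattens
-- all (bigram, term) occurrences into one flat pair list, dedups the bigrams for key order, then
-- gathers each bigram's terms from the flat list and sorts them once (objective: alternative).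
-- Both ports iterate the Python dict's keys: first occurrences of tokenDict's keys, PySem.List.dedup.

-- ===== PORT A =====
def biGramHelper (tokenDict : List (String × Int)) : List (String × List String) :=
  let biGramsDict : PySem.Dict String (List String) :=
    (PySem.List.dedup (tokenDict.map Prod.fst)).foldl (fun d term =>
      -- dollarTerm = "$"+term+"$" (string indexing done at the char-list level)
      let dollarTerm : List Char := '$' :: term.toList ++ ['$']
      -- while index < len(term)+1; indices 0..len(term) are always in range of dollarTerm
      (PySem.List.pyRange 0 (PySem.Str.len term + 1) 1).foldl (fun dict index =>
        let biGrams : String :=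
          String.ofList [PySem.List.pyGetD dollarTerm index ' ',
                         PySem.List.pyGetD dollarTerm (index + 1) ' ']
        if dict.contains biGrams = false then
          dict.insert biGrams [term]
        else
          dict.insert biGrams
            (PySem.List.sorted (dict.getD biGrams [] ++ [term]) (fun x => x))) d)
      PySem.Dict.empty
  biGramsDict.items

-- ===== PORT B =====
def biGramHelper_alt (tokenDict : List (String × Int)) : List (String × List String) :=
  -- occs = [(a + b, t) for t in tokenDict for p in ["$"+t+"$"] for a, b in zip(p, p[1:])]
  -- (strings handled at the char-list level; p[1:] = drop 1, zip = List.zip, a+b a 2-char string)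
  let occs : List (String × String) :=
    (PySem.List.dedup (tokenDict.map Prod.fst)).flatMap (fun t =>
      let p : List Char := '$' :: t.toList ++ ['$']
      (p.zip (p.drop 1)).map (fun q => (String.ofList [q.1, q.2], t)))
  -- keys = list(dict.fromkeys(bg for bg, _ in occs))
  let keys : List String := PySem.List.dedup (occs.map Prod.fst)
  -- {bg: sorted(t for b, t in occs if b == bg) for bg in keys}: keys are distinct (dedup),
  -- so the dict comprehension's item list is exactly this map
  keys.map (fun bg =>
    (bg, PySem.List.sorted ((occs.filter (fun o => o.1 == bg)).map Prod.snd) (fun x => x)))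

-- ===== PRECONDITION & SPEC =====
def Spec_biGramHelper (tokenDict : List (String × Int)) (out : List (String × List String)) : Prop := out = biGramHelper_alt tokenDict
instance (tokenDict : List (String × Int)) (out : List (String × List String)) : Decidable (Spec_biGramHelper tokenDict out) := by unfold Spec_biGramHelper; infer_instance

-- ===== CLAIM (what is proved, stated in full; the proofs are below) =====
def Claim_equal_biGramHelper : Prop := ∀ (tokenDict : List (String × Int)), Dom_biGramHelper tokenDict → Spec_biGramHelper tokenDict (biGramHelper tokenDict)

-- ===== LEMMAS AND PROOFS =====

-- A's per-bigram step (after the index loop is read off as a loop over adjacent pairs).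
def pvStepA (term : String) (dict : PySem.Dict String (List String)) (p : Char × Char) :
    PySem.Dict String (List String) :=
  let biGrams : String := String.ofList [p.1, p.2]
  if dict.contains biGrams = false then
    dict.insert biGrams [term]
  else
    dict.insert biGrams (PySem.List.sorted (dict.getD biGrams [] ++ [term]) (fun x => x))

-- proof-internal grouping step over one (bigram, term) occurrence: append term to the bucket
def pvStepG (d : PySem.Dict String (List String)) (o : String × String) :
    PySem.Dict String (List String) :=
  d.modify o.1 [] (· ++ [o.2])

def pvOcc (t : String) (q : Char × Char) : String × String := (String.ofList [q.1, q.2], t)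

def pvPairs (t : String) : List (Char × Char) :=
  let p : List Char := '$' :: t.toList ++ ['$']
  p.zip (p.drop 1)

def pvF (p : String × List String) : String × List String :=
  (p.1, PySem.List.sorted p.2 (fun x => x))

-- invariant: A's dict is the grouping dict with every bucket sorted, and the grouping keys are distinct
def pvRel (dA dB : PySem.Dict String (List String)) : Prop :=
  dA.items = dB.items.map pvF ∧ dB.keys.Nodup

lemma pvRel_keys {dA dB : PySem.Dict String (List String)} (h : pvRel dA dB) :
    dA.keys = dB.keys := by
  have : dA.items.map Prod.fst = (dB.items.map pvF).map Prod.fst := by rw [h.1]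
  simpa [PySem.Dict.keys, List.map_map, pvF, Function.comp] using this

lemma pvSorted_append_sorted (v : List String) (t : String) :
    PySem.List.sorted (PySem.List.sorted v (fun x => x) ++ [t]) (fun x => x)
      = PySem.List.sorted (v ++ [t]) (fun x => x) := by
  apply PySem.List.sorted_eq_sorted_of_perm _ _ _ (fun a b h => h)
  exact (PySem.List.sorted_perm v (fun x => x) false).append_right [t]

lemma pvStep_rel (t : String) (q : Char × Char) {dA dB : PySem.Dict String (List String)}
    (h : pvRel dA dB) : pvRel (pvStepA t dA q) (pvStepG dB (pvOcc t q)) := by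
  obtain ⟨hitems, hnd⟩ := h
  have hkeys : dA.keys = dB.keys := pvRel_keys ⟨hitems, hnd⟩
  have hG : pvStepG dB (pvOcc t q)
      = dB.insert (String.ofList [q.1, q.2]) (dB.getD (String.ofList [q.1, q.2]) [] ++ [t]) := by
    exact (PySem.Dict.ext_iff.mpr rfl)
  rw [hG]
  simp only [pvStepA]
  set bg : String := String.ofList [q.1, q.2] with hbg
  have hcont : dA.contains bg = dB.contains bg := by
    rw [PySem.Dict.contains_eq_decide_mem_keys, PySem.Dict.contains_eq_decide_mem_keys, hkeys]
  refine ⟨?_, ?_⟩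
  · by_cases hc : dB.contains bg = true
    · -- bg already present: A re-sorts its sorted bucket + [t], the grouping dict merely appends
      obtain ⟨v, hv⟩ : ∃ v, dB.get? bg = some v := by
        have := PySem.Dict.contains_eq_isSome_get? dB bg
        rw [hc] at this
        exact Option.isSome_iff_exists.mp this.symm
      have hvB : dB.getD bg [] = v := PySem.Dict.getD_of_get?_eq_some dB [] hv
      have hmemB : (bg, v) ∈ dB.items := PySem.Dict.mem_items_of_get?_eq_some dB hv
      have hmemA : (bg, PySem.List.sorted v (fun x => x)) ∈ dA.items := by
        rw [hitems]; exact List.mem_map_of_mem hmemB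
      have hndA : dA.keys.Nodup := hkeys ▸ hnd
      have hvA : dA.getD bg [] = PySem.List.sorted v (fun x => x) :=
        PySem.Dict.getD_of_mem_items dA hmemA hndA []
      have hcA : dA.contains bg = true := hcont.trans hc
      rw [hcA, if_neg (by simp), hvA, hvB,
          PySem.Dict.items_insert_of_contains dA _ hcA,
          PySem.Dict.items_insert_of_contains dB _ hc, hitems, List.map_map, List.map_map]
      apply List.map_congr_left
      intro r _
      by_cases hr : r.1 = bg
      · simp [pvF, Function.comp, hr, pvSorted_append_sorted]
      · simp [pvF, Function.comp, hr]
    · -- fresh bigram: both append a singleton bucket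
      have hc' : dB.contains bg = false := by simpa using hc
      have hcA : dA.contains bg = false := hcont.trans hc'
      rw [hcA, if_pos rfl, PySem.Dict.getD_of_not_contains dB [] hc',
          PySem.Dict.items_insert_of_not_contains dA _ hcA,
          PySem.Dict.items_insert_of_not_contains dB _ hc', hitems, List.map_append]
      have hs : PySem.List.sorted [t] (fun x : String => x) = [t] :=
        PySem.List.sorted_eq_self_of_pairwise _ _ (List.pairwise_singleton _ _)
      simp [pvF, hs]
  · exact PySem.Dict.nodup_keys_insert dB _ _ hnd

lemma pvFold_rel (t : String) (l : List (Char × Char)) :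
    ∀ {dA dB : PySem.Dict String (List String)}, pvRel dA dB →
      pvRel (l.foldl (pvStepA t) dA) ((l.map (pvOcc t)).foldl pvStepG dB) := by
  induction l with
  | nil => intro _ _ h; exact h
  | cons q l ih => intro dA dB h; exact ih (pvStep_rel t q h)

-- A's index loop over 0..len(term) reads exactly the adjacent pairs of dollarTerm
lemma pvInnerA_eq (term : String) (d : PySem.Dict String (List String)) :
    (PySem.List.pyRange 0 (PySem.Str.len term + 1) 1).foldl (fun dict index =>
        let biGrams : String :=
          String.ofList [PySem.List.pyGetD ('$' :: term.toList ++ ['$']) index ' ',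
                         PySem.List.pyGetD ('$' :: term.toList ++ ['$']) (index + 1) ' ']
        if dict.contains biGrams = false then
          dict.insert biGrams [term]
        else
          dict.insert biGrams
            (PySem.List.sorted (dict.getD biGrams [] ++ [term]) (fun x => x))) d
    = ((pvPairs term).foldl (pvStepA term) d) := by
  unfold pvPairs
  set dollar : List Char := '$' :: term.toList ++ ['$'] with hdollar
  set zs : List (Char × Char) := dollar.zip (dollar.drop 1) with hzs
  have hlen : zs.length = term.toList.length + 1 := by simp [hzs, hdollar]
  have hdl : dollar.length = zs.length + 1 := by simp [hzs, hdollar]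
  have hbound : PySem.Str.len term + 1 = (zs.length : Int) := by
    rw [PySem.Str.len_eq, hlen]; push_cast; ring
  rw [hbound, ← PySem.List.foldl_pyRange_zero_pyGetD' zs (' ', ' ') (pvStepA term) d]
  apply PySem.List.foldl_congr_mem
  intro dict i hi
  have hi' : 0 ≤ i ∧ i < (zs.length : Int) := by
    simpa using (PySem.List.mem_pyRange_one).mp hi
  obtain ⟨k, rfl⟩ : ∃ k : Nat, i = (k : Int) := ⟨i.toNat, by omega⟩
  have hk : k < zs.length := by exact_mod_cast hi'.2
  have hk1 : k < dollar.length := by omega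
  have hk2 : k + 1 < dollar.length := by omega
  have e1 : (k : Int) + 1 = ((k + 1 : Nat) : Int) := by push_cast; ring
  rw [e1, PySem.List.pyGetD_natCast, PySem.List.pyGetD_natCast, PySem.List.pyGetD_natCast,
      List.getD_eq_getElem dollar ' ' hk1, List.getD_eq_getElem dollar ' ' hk2,
      List.getD_eq_getElem zs (' ', ' ') hk]
  have hzk : zs[k] = (dollar[k], dollar[k + 1]) := by
    have h' : (dollar.zip (List.drop 1 dollar))[k]'(by exact hk)
        = (dollar[k], dollar[k + 1]) := by
      rw [List.getElem_zip]
      refine congrArg _ ?_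
      rw [List.getElem_drop]
      congr 1
      omega
    exact h'
  rw [hzk]
  simp only [pvStepA]

-- the occurrence stream of a term list
def pvOccs (terms : List String) : List (String × String) :=
  terms.flatMap (fun t => (pvPairs t).map (pvOcc t))

lemma pvOuter_rel (terms : List String) :
    ∀ {dA dB : PySem.Dict String (List String)}, pvRel dA dB →
      pvRel
        (terms.foldl (fun d term =>
          (PySem.List.pyRange 0 (PySem.Str.len term + 1) 1).foldl (fun dict index =>
            let biGrams : String :=
              String.ofList [PySem.List.pyGetD ('$' :: term.toList ++ ['$']) index ' ',
                             PySem.List.pyGetD ('$' :: term.toList ++ ['$']) (index + 1) ' ']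
            if dict.contains biGrams = false then
              dict.insert biGrams [term]
            else
              dict.insert biGrams
                (PySem.List.sorted (dict.getD biGrams [] ++ [term]) (fun x => x))) d) dA)
        ((pvOccs terms).foldl pvStepG dB) := by
  induction terms with
  | nil => intro _ _ h; exact h
  | cons t ts ih =>
    intro dA dB h
    simp only [List.foldl_cons, pvOccs, List.flatMap_cons, List.foldl_append]
    have h' := pvFold_rel t (pvPairs t) h
    rw [pvInnerA_eq]
    exact ih h'

-- the grouping dict built from the occurrence stream, characterised in closed form
lemma pvGroup_items (occs : List (String × String)) :
    (occs.foldl pvStepG PySem.Dict.empty).items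
      = (PySem.List.dedup (occs.map Prod.fst)).map (fun bg =>
          (bg, (occs.filter (fun o => o.1 == bg)).map Prod.snd)) := by
  have hnd : (occs.foldl pvStepG PySem.Dict.empty).keys.Nodup := by
    unfold pvStepG
    exact PySem.Dict.nodup_keys_foldl_modify_key occs Prod.fst [] _ PySem.Dict.empty
      PySem.Dict.nodup_keys_empty
  have hkeys : (occs.foldl pvStepG PySem.Dict.empty).keys
      = PySem.List.dedup (occs.map Prod.fst) := by
    unfold pvStepG
    rw [PySem.Dict.keys_foldl_modify_key]
    simp [PySem.Set.update_eq_append_filter, PySem.Set.contains, PySem.Dict.keys_empty]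
  rw [PySem.Dict.items_eq_map_keys _ hnd [], hkeys]
  apply List.map_congr_left
  intro bg _
  have hget : (occs.foldl pvStepG PySem.Dict.empty).getD bg []
      = (occs.filter (fun o => o.1 == bg)).map Prod.snd := by
    unfold pvStepG
    have := PySem.Dict.getD_foldl_modify_append occs PySem.Dict.empty bg
    simpa using this
  rw [hget]

-- ===== VERDICT (by name: the statement is the Claim_ definition above) =====
theorem biGramHelper_spec : Claim_equal_biGramHelper := by
  intro tokenDict _
  unfold Spec_biGramHelper biGramHelper biGramHelper_alt
  have hrel := pvOuter_rel (PySem.List.dedup (tokenDict.map Prod.fst))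
    (dA := PySem.Dict.empty) (dB := PySem.Dict.empty)
    ⟨by simp [PySem.Dict.empty], PySem.Dict.nodup_keys_empty⟩
  rw [hrel.1, pvGroup_items]
  simp only [List.map_map]
  apply List.map_congr_left
  intro bg _
  simp only [pvOccs, pvPairs]
  rfl
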